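-- pv_equiv track=rewrite | github.com/viswajithRoop/matrix_problem | matrix.py | matrix_diagonal
-- ===== SOURCE A (Python) =====
-- def matrix_diagonal(rows,cols):
--     new_matrix = []
--     for i in range(rows):
--         new_row = []
--         for j in range(cols):
--             new_row.append(0)
--         new_matrix.append(new_row)
--     num = 1
--     for k in range(rows+cols-1):
--         for i in range(rows):
--             for j in range(cols):
--                 if i+j == k and i == j:
--                     new_matrix[i][j]=num
--                     num = num+1
--                 elif i+j == k and i>j:
--                     new_matrix[i][j]=num
--                     num = num+1
--
--                 elif i+j ==k and j>i:
--                     new_matrix[j][i]=num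
--                     num = num+1
--
--     return new_matrix
-- ===== SOURCE B (Python) =====
-- def matrix_diagonal(rows, cols):
--     # Closed form: each anti-diagonal k holds cells written left-to-right with a
--     # running counter, so the value of cell (i, j) with i >= j is
--     # 1 + (number of grid cells on diagonals < i+j) + (i's position on its diagonal);
--     # cells above the main diagonal are never written and stay 0.
--     def tri(x):
--         return x * (x + 1) // 2 if x > 0 else 0
--
--     def before(k):  # grid cells (a, b) with a+b < k (inclusion-exclusion)
--         return tri(k) - tri(k - cols) - tri(k - rows) + tri(k - rows - cols)
--
--     return [[before(i + j) + (i - max(0, i + j - cols + 1)) + 1 if i >= j else 0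
--              for j in range(cols)] for i in range(rows)]
-- ===== Notes on version B (the rewrite author's own statement) =====
-- stated objective: faster
-- what changed: B replaces A's stateful triple loop (a running counter rescanning the whole rows x cols grid once per anti-diagonal) by a closed-form per-cell formula: cell (i,j) with i>=j equals 1 + (number of grid cells on earlier anti-diagonals, by inclusion-exclusion over triangular numbers) + i's offset on its own diagonal, assembled as a nested comprehension with no mutable state
import Mathlib
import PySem

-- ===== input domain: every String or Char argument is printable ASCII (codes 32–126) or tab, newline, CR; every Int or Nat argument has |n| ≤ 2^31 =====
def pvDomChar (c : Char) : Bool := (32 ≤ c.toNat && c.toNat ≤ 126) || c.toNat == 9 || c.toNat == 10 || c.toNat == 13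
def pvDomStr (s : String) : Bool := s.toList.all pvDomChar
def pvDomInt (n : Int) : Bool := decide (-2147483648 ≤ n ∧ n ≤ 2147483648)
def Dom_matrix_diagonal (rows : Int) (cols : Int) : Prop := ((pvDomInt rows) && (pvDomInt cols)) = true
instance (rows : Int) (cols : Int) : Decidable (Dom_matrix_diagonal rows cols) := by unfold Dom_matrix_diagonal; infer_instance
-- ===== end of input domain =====

-- B replaces A's counter-driven triple loop by a closed-form per-cell formula built
-- with a nested comprehension and no mutable state (objective: faster).

-- ===== PORT A =====
-- `new_matrix[i][j] = v` for the nonnegative in-range indices these ports actually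
-- write (every write inside Pre_ is in range; out of range Python A raises, excluded by Pre_)
def pvSetCell (M : List (List Int)) (i j : Int) (v : Int) : List (List Int) :=
  M.set i.toNat ((M.getD i.toNat []).set j.toNat v)

def matrix_diagonal (rows : Int) (cols : Int) : List (List Int) :=
  let M0 := (PySem.List.pyRange 0 rows 1).foldl (fun m _ =>
      m ++ [(PySem.List.pyRange 0 cols 1).foldl (fun row _ => row ++ [(0:Int)]) ([] : List Int)]) []
  ((PySem.List.pyRange 0 (rows + cols - 1) 1).foldl (fun st k =>
      (PySem.List.pyRange 0 rows 1).foldl (fun st i =>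
        (PySem.List.pyRange 0 cols 1).foldl (fun (st : List (List Int) × Int) j =>
          if i + j = k ∧ i = j then (pvSetCell st.1 i j st.2, st.2 + 1)
          else if i + j = k ∧ i > j then (pvSetCell st.1 i j st.2, st.2 + 1)
          else if i + j = k ∧ j > i then (pvSetCell st.1 j i st.2, st.2 + 1)
          else st) st) st) (M0, (1:Int))).1

-- ===== PORT B =====
-- tri(x) = x*(x+1)//2 if x > 0 else 0
def pvTri (x : Int) : Int := if 0 < x then PySem.Int.floordiv (x * (x + 1)) 2 else 0

-- before(k) = number of grid cells (a,b) with a+b < k (inclusion-exclusion)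
def pvBefore (rows cols k : Int) : Int :=
  pvTri k - pvTri (k - cols) - pvTri (k - rows) + pvTri (k - rows - cols)

def matrix_diagonal_alt (rows : Int) (cols : Int) : List (List Int) :=
  (PySem.List.pyRange 0 rows 1).map (fun i =>
    (PySem.List.pyRange 0 cols 1).map (fun j =>
      if i ≥ j then pvBefore rows cols (i + j) + (i - max 0 (i + j - cols + 1)) + 1
      else 0))

-- ===== PRECONDITION & SPEC =====
-- Python A raises IndexError (it writes new_matrix[j][i] with j ≥ rows) exactly when
-- rows ≥ 1 and cols > rows; Pre_ excludes exactly those inputs. On every other input A returns.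
def Pre_matrix_diagonal (rows : Int) (cols : Int) : Prop := rows ≤ 0 ∨ cols ≤ rows
instance (rows : Int) (cols : Int) : Decidable (Pre_matrix_diagonal rows cols) := by
  unfold Pre_matrix_diagonal; infer_instance
def pvWitness_matrix_diagonal : Int × Int := (3, 3)

def Spec_matrix_diagonal (rows : Int) (cols : Int) (out : List (List Int)) : Prop := out = matrix_diagonal_alt rows cols
instance (rows : Int) (cols : Int) (out : List (List Int)) : Decidable (Spec_matrix_diagonal rows cols out) := by unfold Spec_matrix_diagonal; infer_instance

-- ===== CLAIM (what is proved, stated in full; the proofs are below) =====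
def Claim_equal_matrix_diagonal : Prop := ∀ (rows : Int) (cols : Int), Dom_matrix_diagonal rows cols → Pre_matrix_diagonal rows cols → Spec_matrix_diagonal rows cols (matrix_diagonal rows cols)

-- ===== LEMMAS AND PROOFS =====

-- ---- Part 1: reduce A's grid rescan per diagonal to a direct walk of the diagonal ----

-- appending one 0 per element = replicate
theorem pv_foldl_append_zero {α : Type} (l : List α) (a : List Int) :
    l.foldl (fun r _ => r ++ [(0:Int)]) a = a ++ List.replicate l.length 0 := by
  induction l generalizing a with
  | nil => simp
  | cons x xs ih => simp [ih, List.replicate_succ]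

theorem pv_row_eq (cols : Int) :
    (PySem.List.pyRange 0 cols 1).foldl (fun r _ => r ++ [(0:Int)]) ([] : List Int)
      = List.replicate cols.toNat 0 := by
  rw [pv_foldl_append_zero]
  simp [PySem.List.length_pyRange_one]

-- sorted-by-< lists with the same members are equal
theorem pv_eq_of_pw (l1 l2 : List Int) (h1 : l1.Pairwise (·<·)) (h2 : l2.Pairwise (·<·))
    (h : ∀ x, x ∈ l1 ↔ x ∈ l2) : l1 = l2 := by
  have p : l1.Perm l2 := (List.perm_ext_iff_of_nodup (h1.imp ne_of_lt) (h2.imp ne_of_lt)).mpr h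
  exact List.Perm.eq_of_pairwise (fun a b _ _ hab hba => absurd hba (not_lt.mpr hab.le)) h1 h2 p

-- filtering a duplicate-free list for one target value
theorem pv_filter_eq_target (l : List Int) (hn : l.Nodup) (t : Int) :
    l.filter (fun x => decide (x = t)) = if t ∈ l then [t] else [] := by
  induction l with
  | nil => simp
  | cons x xs ih =>
    rcases List.nodup_cons.mp hn with ⟨hx, hxs⟩
    by_cases hxt : x = t
    · subst hxt
      simp [ih hxs, hx]
    · simp [hxt, ih hxs, Ne.symm hxt]

-- the j-scan of A fires exactly at j = k - i, where it performs the collapsed write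
theorem pv_jloop_eq (cols k i : Int) (st : List (List Int) × Int) :
    (PySem.List.pyRange 0 cols 1).foldl (fun (st : List (List Int) × Int) j =>
        if i + j = k ∧ i = j then (pvSetCell st.1 i j st.2, st.2 + 1)
        else if i + j = k ∧ i > j then (pvSetCell st.1 i j st.2, st.2 + 1)
        else if i + j = k ∧ j > i then (pvSetCell st.1 j i st.2, st.2 + 1)
        else st) st
    = if decide (0 ≤ k - i ∧ k - i < cols) then
        (if i ≥ k - i then (pvSetCell st.1 i (k - i) st.2, st.2 + 1)
         else (pvSetCell st.1 (k - i) i st.2, st.2 + 1))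
      else st := by
  have hstep : (fun (st : List (List Int) × Int) j =>
        if i + j = k ∧ i = j then (pvSetCell st.1 i j st.2, st.2 + 1)
        else if i + j = k ∧ i > j then (pvSetCell st.1 i j st.2, st.2 + 1)
        else if i + j = k ∧ j > i then (pvSetCell st.1 j i st.2, st.2 + 1)
        else st)
      = (fun (st : List (List Int) × Int) j =>
        if (fun j => decide (j = k - i)) j then
          (if i ≥ j then (pvSetCell st.1 i j st.2, st.2 + 1)
           else (pvSetCell st.1 j i st.2, st.2 + 1))
        else st) := by
    funext st j
    simp only [decide_eq_true_eq]
    split_ifs <;> first | rfl | omega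
  rw [hstep, ← List.foldl_filter,
    pv_filter_eq_target _ (PySem.List.nodup_pyRange_one 0 cols) (k - i)]
  by_cases h : 0 ≤ k - i ∧ k - i < cols
  · rw [if_pos (PySem.List.mem_pyRange_one.mpr ⟨h.1, h.2⟩), if_pos (by simpa using h)]
    rfl
  · rw [if_neg (fun hm => h (by simpa using PySem.List.mem_pyRange_one.mp hm)),
      if_neg (by simpa using h)]
    rfl

-- the guarded i-scan over range(rows) equals a direct walk over the diagonal's rows
theorem pv_filter_range_eq (rows cols k : Int) :
    (PySem.List.pyRange 0 rows 1).filter (fun i => decide (0 ≤ k - i ∧ k - i < cols))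
      = PySem.List.pyRange (max 0 (k - cols + 1)) (min (rows - 1) k + 1) 1 := by
  apply pv_eq_of_pw
  · exact (PySem.List.pairwise_lt_pyRange_one 0 rows).filter _
  · exact PySem.List.pairwise_lt_pyRange_one _ _
  · intro x
    simp [List.mem_filter, PySem.List.mem_pyRange_one]
    omega

-- the write performed for walk index i on diagonal k
def pvStep (k : Int) (st : List (List Int) × Int) (i : Int) : List (List Int) × Int :=
  if i ≥ k - i then (pvSetCell st.1 i (k - i) st.2, st.2 + 1)
  else (pvSetCell st.1 (k - i) i st.2, st.2 + 1)

-- per-diagonal equality of A's step with the direct walk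
theorem pv_kstep_eq (rows cols k : Int) (st : List (List Int) × Int) :
    (PySem.List.pyRange 0 rows 1).foldl (fun st i =>
        (PySem.List.pyRange 0 cols 1).foldl (fun (st : List (List Int) × Int) j =>
          if i + j = k ∧ i = j then (pvSetCell st.1 i j st.2, st.2 + 1)
          else if i + j = k ∧ i > j then (pvSetCell st.1 i j st.2, st.2 + 1)
          else if i + j = k ∧ j > i then (pvSetCell st.1 j i st.2, st.2 + 1)
          else st) st) st
    = (PySem.List.pyRange (max 0 (k - cols + 1)) (min (rows - 1) k + 1) 1).foldl (pvStep k) st := by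
  have hf : (fun (st : List (List Int) × Int) i =>
        (PySem.List.pyRange 0 cols 1).foldl (fun (st : List (List Int) × Int) j =>
          if i + j = k ∧ i = j then (pvSetCell st.1 i j st.2, st.2 + 1)
          else if i + j = k ∧ i > j then (pvSetCell st.1 i j st.2, st.2 + 1)
          else if i + j = k ∧ j > i then (pvSetCell st.1 j i st.2, st.2 + 1)
          else st) st)
      = (fun (st : List (List Int) × Int) i =>
        if (fun i => decide (0 ≤ k - i ∧ k - i < cols)) i then pvStep k st i else st) := by
    funext st i
    exact pv_jloop_eq cols k i st
  rw [hf, ← List.foldl_filter, pv_filter_range_eq rows cols k]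

-- ---- Part 2: function-valued matrices ----

def pvMk (r c : Int) (f : Int → Int → Int) : List (List Int) :=
  (PySem.List.pyRange 0 r 1).map (fun a => (PySem.List.pyRange 0 c 1).map (f a))

theorem pvMk_congr (r c : Int) (f g : Int → Int → Int)
    (h : ∀ a b, 0 ≤ a → a < r → 0 ≤ b → b < c → f a b = g a b) :
    pvMk r c f = pvMk r c g := by
  unfold pvMk
  apply List.map_congr_left
  intro a ha
  obtain ⟨ha0, har⟩ := PySem.List.mem_pyRange_one.mp ha
  apply List.map_congr_left
  intro b hb
  obtain ⟨hb0, hbc⟩ := PySem.List.mem_pyRange_one.mp hb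
  exact h a b ha0 har hb0 hbc

theorem pvMk_set (r c : Int) (f : Int → Int → Int) (a b v : Int)
    (ha0 : 0 ≤ a) (har : a < r) (hb0 : 0 ≤ b) (hbc : b < c) :
    pvSetCell (pvMk r c f) a b v
      = pvMk r c (fun x y => if x = a ∧ y = b then v else f x y) := by
  have hlr : ((PySem.List.pyRange 0 r 1).map
      (fun x => (PySem.List.pyRange 0 c 1).map (f x))).length = (r - 0).toNat := by
    simp [PySem.List.length_pyRange_one]
  have haN : a.toNat < (r - 0).toNat := by omega
  unfold pvSetCell pvMk
  have hget : ((PySem.List.pyRange 0 r 1).map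
      (fun x => (PySem.List.pyRange 0 c 1).map (f x))).getD a.toNat []
      = (PySem.List.pyRange 0 c 1).map (f a) := by
    rw [List.getD_eq_getElem _ _ (by simpa [hlr] using haN)]
    rw [List.getElem_map, PySem.List.getElem_pyRange_one,
      show (0:Int) + (a.toNat:Int) = a by omega]
  rw [hget]
  apply List.ext_getElem
  · simp
  · intro n h1 h2
    simp only [List.length_set, List.length_map, PySem.List.length_pyRange_one] at h1 h2
    rw [List.getElem_set]
    by_cases hn : a.toNat = n
    · rw [if_pos hn]
      subst hn
      rw [List.getElem_map, PySem.List.getElem_pyRange_one,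
        show (0:Int) + (a.toNat:Int) = a by omega]
      apply List.ext_getElem
      · simp
      · intro m hm1 hm2
        simp only [List.length_set, List.length_map, PySem.List.length_pyRange_one] at hm1 hm2
        simp only [List.getElem_set, List.getElem_map, PySem.List.getElem_pyRange_one]
        by_cases hm : b.toNat = m
        · rw [if_pos hm, if_pos ⟨by trivial, by omega⟩]
        · rw [if_neg hm, if_neg (by rintro ⟨h, h'⟩; omega)]
    · rw [if_neg hn]
      simp only [List.getElem_map, PySem.List.getElem_pyRange_one]
      apply List.map_congr_left
      intro y hy
      obtain ⟨hy0, hyc⟩ := PySem.List.mem_pyRange_one.mp hy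
      rw [if_neg (by rintro ⟨h, h'⟩; omega)]

-- ---- Part 3: arithmetic of the closed form ----

theorem pvTri_nonpos (x : Int) (h : x ≤ 0) : pvTri x = 0 := by
  unfold pvTri
  rw [if_neg (by omega)]

theorem pvTri_succ (x : Int) : pvTri (x + 1) = pvTri x + max (x + 1) 0 := by
  by_cases h1 : 0 < x + 1
  · by_cases h0 : 0 < x
    · unfold pvTri
      rw [if_pos h1, if_pos h0,
        PySem.Int.floordiv_eq_ediv_of_pos (by omega),
        PySem.Int.floordiv_eq_ediv_of_pos (by omega)]
      have he : (x + 1) * (x + 1 + 1) = x * (x + 1) + (x + 1) * 2 := by ring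
      rw [he, Int.add_mul_ediv_right _ _ (by omega)]
      omega
    · have hx : x = 0 := by omega
      subst hx
      decide
  · rw [pvTri_nonpos _ (by omega), pvTri_nonpos _ (by omega)]
    omega

theorem pvBefore_succ (r c k : Int) :
    pvBefore r c (k + 1) = pvBefore r c k
      + (max (k + 1) 0 - max (k + 1 - c) 0 - max (k + 1 - r) 0 + max (k + 1 - r - c) 0) := by
  unfold pvBefore
  have e1 := pvTri_succ k
  have e2 := pvTri_succ (k - c)
  have e3 := pvTri_succ (k - r)
  have e4 := pvTri_succ (k - r - c)
  have h2 : k + 1 - c = k - c + 1 := by ring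
  have h3 : k + 1 - r = k - r + 1 := by ring
  have h4 : k + 1 - r - c = k - r - c + 1 := by ring
  rw [h4, h3, h2]
  omega

theorem pvBefore_zero (r c : Int) (hr : 1 ≤ r) (hc : 1 ≤ c) : pvBefore r c 0 = 0 := by
  unfold pvBefore
  rw [pvTri_nonpos 0 (by omega), pvTri_nonpos _ (by omega), pvTri_nonpos _ (by omega),
    pvTri_nonpos _ (by omega)]
  ring

-- ---- Part 4: the loop invariant ----

-- final value of cell (a,b) (B's cell formula)
def pvFin (r c a b : Int) : Int :=
  if a ≥ b then pvBefore r c (a + b) + (a - max 0 (a + b - c + 1)) + 1 else 0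

-- matrix contents after all diagonals < K have been processed
def pvMatF (r c K a b : Int) : Int := if a + b < K then pvFin r c a b else 0

-- matrix contents mid-diagonal k, after walk indices < I have been processed:
-- a diagonal-k cell (a,b) with b ≤ a holds its final value once i = a has run,
-- and before that the mirrored value written by i = b (if that index exists)
def pvMid (r c k I a b : Int) : Int :=
  if a + b < k then pvFin r c a b
  else if a + b = k ∧ b ≤ a then
    (if a < I then pvBefore r c k + (a - max 0 (k - c + 1)) + 1
     else if b < I ∧ a < c then pvBefore r c k + (b - max 0 (k - c + 1)) + 1
     else 0)
  else 0

theorem pv_walk_inv (r c k : Int) (hr : 1 ≤ r) (hc1 : 1 ≤ c) (hcr : c ≤ r)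
    (hk0 : 0 ≤ k) (hk : k < r + c - 1) :
    ∀ I : Int, max 0 (k - c + 1) ≤ I → I ≤ min (r - 1) k + 1 →
    (PySem.List.pyRange (max 0 (k - c + 1)) I 1).foldl (pvStep k)
        (pvMk r c (pvMatF r c k), pvBefore r c k + 1)
      = (pvMk r c (pvMid r c k I), pvBefore r c k + (I - max 0 (k - c + 1)) + 1) := by
  intro I hI1
  induction I, hI1 using Int.le_induction with
  | base =>
    intro _
    rw [PySem.List.pyRange_one_eq_nil (le_refl _)]
    simp only [List.foldl_nil]
    refine Prod.ext ?_ ?_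
    · apply pvMk_congr
      intro a b ha0 har hb0 hbc
      unfold pvMatF pvMid
      split_ifs <;> omega
    · omega
  | succ I hIlo ih =>
    intro hI2
    rw [PySem.List.pyRange_one_succ_right hIlo, List.foldl_append,
      ih (by omega), List.foldl_cons, List.foldl_nil]
    unfold pvStep
    by_cases hge : I ≥ k - I
    · rw [if_pos hge]
      simp only
      rw [pvMk_set r c _ I (k - I) _ (by omega) (by omega) (by omega) (by omega)]
      refine Prod.ext ?_ ?_
      · apply pvMk_congr
        intro a b ha0 har hb0 hbc
        by_cases hw : a = I ∧ b = k - I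
        · rw [if_pos hw]
          unfold pvMid
          rw [if_neg (by omega), if_pos (by omega), if_pos (by omega)]
          omega
        · rw [if_neg hw]
          unfold pvMid
          split_ifs <;> omega
      · omega
    · rw [if_neg hge]
      simp only
      rw [pvMk_set r c _ (k - I) I _ (by omega) (by omega) (by omega) (by omega)]
      refine Prod.ext ?_ ?_
      · apply pvMk_congr
        intro a b ha0 har hb0 hbc
        by_cases hw : a = k - I ∧ b = I
        · rw [if_pos hw]
          unfold pvMid
          rw [if_neg (by omega), if_pos (by omega), if_neg (by omega),
            if_pos (by constructor <;> omega)]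
          omega
        · rw [if_neg hw]
          unfold pvMid
          split_ifs <;> omega
      · omega

theorem pv_outer (r c : Int) (hr : 1 ≤ r) (hc1 : 1 ≤ c) (hcr : c ≤ r) :
    ∀ K : Int, 0 ≤ K → K ≤ r + c - 1 →
    (PySem.List.pyRange 0 K 1).foldl (fun st k =>
        (PySem.List.pyRange (max 0 (k - c + 1)) (min (r - 1) k + 1) 1).foldl (pvStep k) st)
      (pvMk r c (pvMatF r c 0), pvBefore r c 0 + 1)
    = (pvMk r c (pvMatF r c K), pvBefore r c K + 1) := by
  intro K hK0
  induction K, hK0 using Int.le_induction with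
  | base =>
    intro _
    rw [PySem.List.pyRange_one_eq_nil (le_refl _)]
    simp only [List.foldl_nil]
  | succ K hK0 ih =>
    intro hK
    rw [PySem.List.pyRange_one_succ_right hK0, List.foldl_append,
      ih (by omega), List.foldl_cons, List.foldl_nil]
    rw [pv_walk_inv r c K hr hc1 hcr hK0 (by omega) (min (r - 1) K + 1) (by omega) (le_refl _)]
    refine Prod.ext ?_ ?_
    · apply pvMk_congr
      intro a b ha0 har hb0 hbc
      by_cases hab : a + b = K
      · simp only [pvMid, pvMatF, pvFin, hab]
        split_ifs <;> (try simp only [true_and] at *) <;> omega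
      · simp only [pvMid, pvMatF]
        split_ifs <;> omega
    · rw [pvBefore_succ]
      omega

-- B's port as a function-valued matrix
theorem pv_alt_eq (r c : Int) : matrix_diagonal_alt r c = pvMk r c (pvFin r c) := rfl

-- A reduced to the diagonal-walk fold
theorem pv_A_eq (r c : Int) :
    matrix_diagonal r c
      = ((PySem.List.pyRange 0 (r + c - 1) 1).foldl (fun st k =>
          (PySem.List.pyRange (max 0 (k - c + 1)) (min (r - 1) k + 1) 1).foldl (pvStep k) st)
        ((PySem.List.pyRange 0 r 1).foldl (fun m _ =>
          m ++ [(PySem.List.pyRange 0 c 1).foldl (fun row _ => row ++ [(0:Int)]) ([] : List Int)]) [],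
         (1:Int))).1 := by
  unfold matrix_diagonal
  dsimp only
  congr 1
  congr 1
  funext st k
  exact pv_kstep_eq r c k st

-- A's initial matrix
theorem pv_M0_eq (r c : Int) :
    (PySem.List.pyRange 0 r 1).foldl (fun m _ =>
        m ++ [(PySem.List.pyRange 0 c 1).foldl (fun row _ => row ++ [(0:Int)]) ([] : List Int)]) []
      = (PySem.List.pyRange 0 r 1).map (fun _ => List.replicate c.toNat (0:Int)) := by
  rw [PySem.List.foldl_append_singleton_eq_map, pv_row_eq, List.nil_append]

-- when the diagonal walks are all empty, the whole diagonal pass is the identity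
theorem pv_all_walks_empty (r c : Int)
    (h : ∀ k : Int, 0 ≤ k → min (r - 1) k + 1 ≤ max 0 (k - c + 1))
    (init : List (List Int) × Int) :
    (PySem.List.pyRange 0 (r + c - 1) 1).foldl (fun st k =>
        (PySem.List.pyRange (max 0 (k - c + 1)) (min (r - 1) k + 1) 1).foldl (pvStep k) st) init
      = init := by
  rw [PySem.List.foldl_congr_mem (g := fun st _ => st), PySem.List.foldl_ignore]
  intro acc k hk
  obtain ⟨hk0, _⟩ := PySem.List.mem_pyRange_one.mp hk
  rw [PySem.List.pyRange_one_eq_nil (h k hk0)]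
  rfl

-- ===== VERDICT (by name: the statement is the Claim_ definition above) =====
theorem matrix_diagonal_spec : Claim_equal_matrix_diagonal := by
  intro r c _ hpre
  unfold Spec_matrix_diagonal
  rw [pv_A_eq, pv_M0_eq]
  by_cases hr : r ≤ 0
  · -- no rows: A's matrix is [] and every diagonal walk is empty
    rw [PySem.List.pyRange_one_eq_nil hr, List.map_nil,
      pv_all_walks_empty r c (by intro k hk0; omega) ([], 1)]
    unfold matrix_diagonal_alt
    rw [PySem.List.pyRange_one_eq_nil hr, List.map_nil]
  · have hr1 : 1 ≤ r := by omega
    have hcr : c ≤ r := by rcases hpre with h | h; omega; exact h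
    by_cases hc : c ≤ 0
    · -- no columns: every row is [] and every diagonal walk is empty
      rw [pv_all_walks_empty r c (by intro k hk0; omega) _]
      unfold matrix_diagonal_alt
      simp only [PySem.List.pyRange_one_eq_nil hc, List.map_nil,
        Int.toNat_of_nonpos hc, List.replicate_zero]
    · -- main case: 1 ≤ c ≤ r
      have hc1 : 1 ≤ c := by omega
      have hinit : ((PySem.List.pyRange 0 r 1).map (fun _ => List.replicate c.toNat (0:Int)), (1:Int))
          = (pvMk r c (pvMatF r c 0), pvBefore r c 0 + 1) := by
        refine Prod.ext ?_ ?_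
        · unfold pvMk
          apply List.map_congr_left
          intro a ha
          obtain ⟨ha0, _⟩ := PySem.List.mem_pyRange_one.mp ha
          rw [show (PySem.List.pyRange 0 c 1).map (pvMatF r c 0 a)
              = (PySem.List.pyRange 0 c 1).map (fun _ => (0:Int)) from
            List.map_congr_left (by
              intro b hb
              obtain ⟨hb0, _⟩ := PySem.List.mem_pyRange_one.mp hb
              unfold pvMatF
              rw [if_neg (by omega)])]
          rw [List.map_const', PySem.List.length_pyRange_one]
          congr 1
          omega
        · show (1:Int) = pvBefore r c 0 + 1
          rw [pvBefore_zero r c hr1 hc1]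
          omega
      rw [hinit, pv_outer r c hr1 hc1 hcr (r + c - 1) (by omega) (le_refl _), pv_alt_eq]
      apply pvMk_congr
      intro a b ha0 har hb0 hbc
      unfold pvMatF
      rw [if_pos (by omega)]
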